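-- pv_equiv track=rewrite | github.com/minhphuoc2672006-hash/Tool_ai_mb5 | main.py | alternating_tail_length
-- ===== SOURCE A (Python) =====
-- from typing import Any, Dict, List, Optional, Tuple
--
-- def alternating_tail_length(labels: List[str]) -> int:
--     if len(labels) < 2:
--         return len(labels)
--     n = 1
--     for i in range(len(labels) - 1, 0, -1):
--         if labels[i] != labels[i - 1]:
--             n += 1
--         else:
--             break
--     return n
-- ===== SOURCE B (Python) =====
-- from typing import List
--
-- def alternating_tail_length(labels: List[str]) -> int:
--     # Single forward pass: track the index where the final alternating run starts
--     # (the last position whose label equals its predecessor), then subtract.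
--     start = 0
--     for i in range(1, len(labels)):
--         if labels[i] == labels[i - 1]:
--             start = i
--     return len(labels) - start
-- ===== Notes on version B (the rewrite author's own statement) =====
-- stated objective: alternative
-- what changed: Forward single pass tracking the index of the last adjacent-equal break and returning len-start arithmetically, instead of counting backward from the end with an early break.
import Mathlib
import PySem

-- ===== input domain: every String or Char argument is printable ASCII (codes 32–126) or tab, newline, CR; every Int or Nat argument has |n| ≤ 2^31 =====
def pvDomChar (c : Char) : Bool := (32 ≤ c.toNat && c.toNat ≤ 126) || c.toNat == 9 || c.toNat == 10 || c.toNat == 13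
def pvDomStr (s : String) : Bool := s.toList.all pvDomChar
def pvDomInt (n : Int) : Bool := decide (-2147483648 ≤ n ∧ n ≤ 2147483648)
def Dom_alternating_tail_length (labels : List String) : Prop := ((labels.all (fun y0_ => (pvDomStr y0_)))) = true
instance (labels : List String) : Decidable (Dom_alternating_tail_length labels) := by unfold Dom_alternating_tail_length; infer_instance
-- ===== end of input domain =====

-- B replaces the backward early-exit count with a forward pass tracking the last break index (alternative decomposition, same cost).
-- ===== PORT A =====
-- the for-loop over range(len-1, 0, -1) with break, as structural recursion on the index
def altA_loop (l : List String) : Nat → Int → Int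
  | 0, acc => acc
  | (i+1), acc => if l.getD (i+1) "" ≠ l.getD i "" then altA_loop l i (acc+1) else acc

def alternating_tail_length (labels : List String) : Int :=
  if labels.length < 2 then (labels.length : Int)
  else altA_loop labels (labels.length - 1) 1

-- ===== PORT B =====
def alternating_tail_length_alt (labels : List String) : Int :=
  let start := (List.range' 1 (labels.length - 1)).foldl
    (fun s i => if labels.getD i "" = labels.getD (i-1) "" then (i : Int) else s) 0
  (labels.length : Int) - start

-- ===== PRECONDITION & SPEC =====
def Spec_alternating_tail_length (labels : List String) (out : Int) : Prop := out = alternating_tail_length_alt labels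
instance (labels : List String) (out : Int) : Decidable (Spec_alternating_tail_length labels out) := by unfold Spec_alternating_tail_length; infer_instance

-- ===== CLAIM (what is proved, stated in full; the proofs are below) =====
def Claim_equal_alternating_tail_length : Prop := ∀ (labels : List String), Dom_alternating_tail_length labels → Spec_alternating_tail_length labels (alternating_tail_length labels)

-- ===== LEMMAS AND PROOFS =====

-- ===== VERDICT (by name: the statement is the Claim_ definition above) =====
def altS (l : List String) (i : Nat) : Int :=
  (List.range' 1 i).foldl
    (fun s j => if l.getD j "" = l.getD (j-1) "" then (j : Int) else s) 0

theorem altS_succ (l : List String) (i : Nat) :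
    altS l (i+1) = if l.getD (i+1) "" = l.getD i "" then ((i : Int)+1) else altS l i := by
  unfold altS
  rw [List.range'_concat, List.foldl_append]
  simp only [List.foldl_cons, List.foldl_nil]
  rw [show 1 + 1 * i = i + 1 by omega]
  simp only [Nat.add_sub_cancel]
  split_ifs
  · push_cast; ring
  · rfl

theorem altA_loop_eq (l : List String) (i : Nat) (acc : Int) :
    altA_loop l i acc = acc + (i : Int) - altS l i := by
  induction i generalizing acc with
  | zero => simp [altA_loop, altS]
  | succ i ih =>
    rw [altA_loop, altS_succ]
    by_cases h : l.getD (i+1) "" = l.getD i ""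
    · rw [if_neg (not_not_intro h), if_pos h]
      push_cast; ring
    · rw [if_pos h, if_neg h, ih]
      push_cast; ring

theorem alternating_tail_length_spec : Claim_equal_alternating_tail_length := by
  intro labels _
  unfold Spec_alternating_tail_length alternating_tail_length alternating_tail_length_alt
  show _ = (labels.length : Int) - altS labels (labels.length - 1)
  split_ifs with h
  · interval_cases hl : labels.length <;> simp_all [altS]
  · rw [altA_loop_eq]
    have : 2 ≤ labels.length := by omega
    have : ((labels.length - 1 : Nat) : Int) = (labels.length : Int) - 1 := by omega
    rw [this]; ring
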